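-- pv_equiv track=rewrite | github.com/Pangday/Macro-Post-Processing | process_pcf.py | remove_sections
-- ===== SOURCE A (Python) =====
-- def remove_sections(lines, start_sections, stop_sections):
--     new_lines = []
--     skip_lines = False
--
--     for line in lines:
--         # Strip leading/trailing whitespaces and lowercase for comparison
--         stripped_line = line.strip().lower()
--
--         # Check if the current line is a section header that needs to be removed
--         if any(stripped_line == section for section in start_sections):
--             skip_lines = True
--
--         # If we are skipping lines, stop when encountering a stop section
--         if skip_lines:
--             # Check if the line exactly matches any stop section (e.g., 'pipe', not 'pipe-fixed')
--             if any(stripped_line == section for section in stop_sections):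
--                 skip_lines = False
--
--             # Continue skipping lines while in the skip mode
--             if skip_lines:
--                 continue
--
--         # If not skipping lines, add the line to new_lines
--         new_lines.append(line)
--
--     return new_lines
-- ===== SOURCE B (Python) =====
-- def remove_sections(lines, start_sections, stop_sections):
--     starts = set(start_sections)
--     stops = set(stop_sections)
--     new_lines = []
--     i = 0
--     n = len(lines)
--     while i < n:
--         stripped = lines[i].strip().lower()
--         if stripped in starts and stripped not in stops:
--             # start header: drop it and consume lines until a stop header,
--             # which is left for the outer loop to re-read and keep
--             i += 1
--             while i < n and lines[i].strip().lower() not in stops: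
--                 i += 1
--         else:
--             new_lines.append(lines[i])
--             i += 1
--     return new_lines
-- ===== Notes on version B (the rewrite author's own statement) =====
-- stated objective: alternative
-- what changed: Replaces the persistent skip-flag pass with an index-driven outer loop plus a nested inner loop that consumes a whole section up to its stop header (left for the outer loop to keep), with start/stop membership via precomputed sets instead of per-line any() scans.
import Mathlib
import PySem

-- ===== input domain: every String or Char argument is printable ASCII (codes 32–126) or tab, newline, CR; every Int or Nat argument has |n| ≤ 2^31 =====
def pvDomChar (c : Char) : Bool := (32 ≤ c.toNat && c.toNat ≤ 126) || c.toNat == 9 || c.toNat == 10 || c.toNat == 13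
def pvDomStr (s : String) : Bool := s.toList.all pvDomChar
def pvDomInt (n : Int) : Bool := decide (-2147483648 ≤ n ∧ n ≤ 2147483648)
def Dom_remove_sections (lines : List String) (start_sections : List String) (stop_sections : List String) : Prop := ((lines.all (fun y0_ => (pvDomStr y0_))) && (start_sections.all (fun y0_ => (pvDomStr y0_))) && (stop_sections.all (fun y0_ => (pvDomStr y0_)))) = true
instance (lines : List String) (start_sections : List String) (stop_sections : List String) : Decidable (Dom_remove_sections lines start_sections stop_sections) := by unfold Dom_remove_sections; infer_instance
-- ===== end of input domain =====

-- B replaces A's persistent skip-flag pass by an index-driven loop with a nested section-consuming loop and set membership; proved to return the same list.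
-- ===== PORT A =====
-- per-line step of A's for-loop: state = (new_lines, skip_lines)
def pvAStep (start_sections stop_sections : List String)
    (st : List String × Bool) (line : String) : List String × Bool :=
  let stripped_line := PySem.Str.lower (PySem.Str.strip line)
  let skip1 := if start_sections.any (fun section_ => stripped_line == section_) then true else st.2
  if skip1 then
    if stop_sections.any (fun section_ => stripped_line == section_) then
      (st.1 ++ [line], false)
    else
      (st.1, true)
  else
    (st.1 ++ [line], false)

def remove_sections (lines : List String) (start_sections : List String) (stop_sections : List String) : List String :=
  (lines.foldl (pvAStep start_sections stop_sections) ([], false)).1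

-- ===== PORT B =====
-- inner while-loop of B: consume lines until one matches a stop header (kept for the caller)
def pvSkipTo (stops : PySem.Set String) : List String → List String
  | [] => []
  | l :: rest =>
    if PySem.Set.contains stops (PySem.Str.lower (PySem.Str.strip l)) then l :: rest
    else pvSkipTo stops rest

theorem pvSkipTo_length_le (stops : PySem.Set String) (xs : List String) :
    (pvSkipTo stops xs).length ≤ xs.length := by
  induction xs with
  | nil => simp [pvSkipTo]
  | cons l rest ih =>
    simp only [pvSkipTo]
    split
    · simp
    · exact Nat.le_succ_of_le ih

-- outer while-loop of B over the remaining lines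
def pvBGo (starts stops : PySem.Set String) : List String → List String
  | [] => []
  | l :: rest =>
    let stripped := PySem.Str.lower (PySem.Str.strip l)
    if PySem.Set.contains starts stripped ∧ ¬ PySem.Set.contains stops stripped then
      pvBGo starts stops (pvSkipTo stops rest)
    else
      l :: pvBGo starts stops rest
termination_by xs => xs.length
decreasing_by
  · exact Nat.lt_succ_of_le (pvSkipTo_length_le stops rest)
  · simp

def remove_sections_alt (lines : List String) (start_sections : List String) (stop_sections : List String) : List String :=
  pvBGo (PySem.Set.ofList start_sections) (PySem.Set.ofList stop_sections) lines

-- ===== PRECONDITION & SPEC =====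
def Spec_remove_sections (lines : List String) (start_sections : List String) (stop_sections : List String) (out : List String) : Prop := out = remove_sections_alt lines start_sections stop_sections
instance (lines : List String) (start_sections : List String) (stop_sections : List String) (out : List String) : Decidable (Spec_remove_sections lines start_sections stop_sections out) := by unfold Spec_remove_sections; infer_instance

-- ===== CLAIM (what is proved, stated in full; the proofs are below) =====
def Claim_equal_remove_sections : Prop := ∀ (lines : List String) (start_sections : List String) (stop_sections : List String), Dom_remove_sections lines start_sections stop_sections → Spec_remove_sections lines start_sections stop_sections (remove_sections lines start_sections stop_sections)

-- ===== LEMMAS AND PROOFS =====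
-- characterisation of A's fold as a structural recursion over the remaining lines + skip flag
def pvAGo (starts stops : List String) (skip : Bool) : List String → List String
  | [] => []
  | l :: rest =>
    let s := PySem.Str.lower (PySem.Str.strip l)
    if skip || starts.any (fun sec => s == sec) then
      if stops.any (fun sec => s == sec) then l :: pvAGo starts stops false rest
      else pvAGo starts stops true rest
    else l :: pvAGo starts stops false rest

theorem pv_any_eq (xs : List String) (s : String) :
    (xs.any fun sec => s == sec) = decide (s ∈ xs) := by
  induction xs with
  | nil => simp
  | cons a t ih =>
    simp only [List.any_cons, ih, List.mem_cons]
    by_cases h : s = a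
    · simp [h]
    · simp [h, beq_iff_eq]

theorem pvA_foldl_eq (starts stops : List String) (lines : List String) :
    ∀ (acc : List String) (skip : Bool),
      (lines.foldl (pvAStep starts stops) (acc, skip)).1 = acc ++ pvAGo starts stops skip lines := by
  induction lines with
  | nil => intro acc skip; simp [pvAGo]
  | cons l rest ih =>
    intro acc skip
    simp only [List.foldl_cons, pvAStep, pvAGo, pv_any_eq]
    by_cases hst : PySem.Str.lower (PySem.Str.strip l) ∈ starts
    · by_cases hsp : PySem.Str.lower (PySem.Str.strip l) ∈ stops
      · simp [hst, hsp, ih, List.append_assoc]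
      · simp [hst, hsp, ih]
    · cases skip with
      | true =>
        by_cases hsp : PySem.Str.lower (PySem.Str.strip l) ∈ stops
        · simp [hst, hsp, ih, List.append_assoc]
        · simp [hst, hsp, ih]
      | false => simp [hst, ih, List.append_assoc]

theorem pvAB_eq (starts stops : List String) (lines : List String) :
    pvAGo starts stops false lines = pvBGo (PySem.Set.ofList starts) (PySem.Set.ofList stops) lines ∧
    pvAGo starts stops true lines = pvBGo (PySem.Set.ofList starts) (PySem.Set.ofList stops) (pvSkipTo (PySem.Set.ofList stops) lines) := by
  induction lines with
  | nil => simp [pvAGo, pvBGo, pvSkipTo]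
  | cons l rest ih =>
    constructor
    · rw [pvAGo, pvBGo]
      by_cases hst : PySem.Str.lower (PySem.Str.strip l) ∈ starts
      · by_cases hsp : PySem.Str.lower (PySem.Str.strip l) ∈ stops
        · simp [pv_any_eq, hst, hsp, ih.1]
        · simp [pv_any_eq, hst, hsp, ih.2]
      · simp [pv_any_eq, hst, ih.1]
    · rw [pvAGo, pvSkipTo]
      by_cases hsp : PySem.Str.lower (PySem.Str.strip l) ∈ stops
      · simp only [pv_any_eq, hsp, decide_true, if_true, Bool.true_or]
        rw [if_pos (by simp [hsp]), pvBGo]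
        simp [hsp, ih.1]
      · simp [pv_any_eq, hsp, ih.2]


-- ===== VERDICT (by name: the statement is the Claim_ definition above) =====
theorem remove_sections_spec : Claim_equal_remove_sections := by
  intro lines starts stops _
  unfold Spec_remove_sections remove_sections remove_sections_alt
  rw [pvA_foldl_eq]
  simpa using (pvAB_eq starts stops lines).1
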